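-- pv_equiv track=rewrite | github.com/aryanketkar-15/LexSaksham | service_aggriment_dataset/scripts/convert_to_txt.py | find_clause_candidates
-- ===== SOURCE A (Python) =====
-- def find_clause_candidates(paragraph, taxonomy):
--     matches = []
--     para_lower = paragraph.lower()
--     for agreement_type, clauses in taxonomy.items():
--         for clause_type, keywords in clauses.items():
--             for kw in keywords:
--                 if kw.lower() in para_lower:
--                     matches.append((agreement_type, clause_type))
--                     break
--     return matches
-- ===== SOURCE B (Python) =====
-- def find_clause_candidates(paragraph, taxonomy):
--     para_lower = paragraph.lower()
--     lengths = {len(kw) for clauses in taxonomy.values() for kws in clauses.values() for kw in kws}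
--     subs = {para_lower[i:i+L] for L in lengths for i in range(len(para_lower) - L + 1)}
--     return [(agreement_type, clause_type)
--             for agreement_type, clauses in taxonomy.items()
--             for clause_type, keywords in clauses.items()
--             if any(kw.lower() in subs for kw in keywords)]
-- ===== Notes on version B (the rewrite author's own statement) =====
-- stated objective: faster
-- what changed: B precomputes one hash set of all lowercased-paragraph substrings whose lengths occur among the keywords, then decides every clause by O(1) set lookups, instead of A's triple nested loop that substring-searches the whole paragraph for each keyword.
import Mathlib
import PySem

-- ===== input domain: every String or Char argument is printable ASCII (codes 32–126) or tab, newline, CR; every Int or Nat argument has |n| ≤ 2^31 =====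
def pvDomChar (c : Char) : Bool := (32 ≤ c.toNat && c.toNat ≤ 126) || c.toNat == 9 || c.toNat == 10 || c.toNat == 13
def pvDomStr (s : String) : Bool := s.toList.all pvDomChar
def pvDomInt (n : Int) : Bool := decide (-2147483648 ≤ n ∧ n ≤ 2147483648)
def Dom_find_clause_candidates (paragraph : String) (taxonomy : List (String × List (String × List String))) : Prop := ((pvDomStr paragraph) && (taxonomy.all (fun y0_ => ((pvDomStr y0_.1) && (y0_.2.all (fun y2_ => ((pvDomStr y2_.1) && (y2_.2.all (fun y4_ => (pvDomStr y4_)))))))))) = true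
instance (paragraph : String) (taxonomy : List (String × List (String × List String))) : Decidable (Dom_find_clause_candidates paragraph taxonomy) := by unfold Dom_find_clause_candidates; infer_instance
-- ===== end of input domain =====

-- B replaces A's per-keyword substring searches by one precomputed hash set of the
-- paragraph's substrings at the occurring keyword lengths, then O(1) lookups per keyword
-- (objective: faster on many-keyword taxonomies). Return-value equivalence, proved total.

-- ===== PORT A =====
-- inner 'for kw in keywords: if kw.lower() in para_lower: append; break'
def aKwLoop (pl : String) (at_ ct : String) (acc : List (String × String)) :
    List String → List (String × String)
  | [] => acc
  | kw :: rest =>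
    if PySem.Str.isIn (PySem.Str.lower kw) pl then acc ++ [(at_, ct)]
    else aKwLoop pl at_ ct acc rest

def find_clause_candidates (paragraph : String)
    (taxonomy : List (String × List (String × List String))) : List (String × String) :=
  let para_lower := PySem.Str.lower paragraph
  taxonomy.foldl (fun acc p =>
    p.2.foldl (fun acc q => aKwLoop para_lower p.1 q.1 acc q.2) acc) []

-- ===== PORT B =====
-- all_kws = [kw for clauses in taxonomy.values() for kws in clauses.values() for kw in kws]
def bAllKws (taxonomy : List (String × List (String × List String))) : List String :=
  taxonomy.flatMap (fun p => p.2.flatMap (fun q => q.2))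

-- subs = {para_lower[i:i+L] for L in lengths for i in range(len(para_lower) - L + 1)}
-- (a Python set built only for membership tests, so the set-iteration order of 'lengths'
--  is immaterial; ported on the code-point list side, as the PySem string API prescribes)
def bSubs (pl : List Char) (lengths : List Nat) : PySem.Set (List Char) :=
  PySem.Set.ofList (lengths.flatMap (fun (L : Nat) =>
    (PySem.List.pyRange 0 ((pl.length : Int) - (L : Int) + 1) 1).map
      (fun i => PySem.List.slice pl (some i) (some (i + (L : Int))))))

def find_clause_candidates_alt (paragraph : String)
    (taxonomy : List (String × List (String × List String))) : List (String × String) :=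
  let pl := PySem.Chars.lower paragraph.toList
  -- lengths = {len(kw) for ...}: the distinct keyword lengths
  let lengths := PySem.Set.ofList ((bAllKws taxonomy).map (fun kw => kw.toList.length))
  let subs := bSubs pl lengths
  taxonomy.flatMap (fun p =>
    p.2.flatMap (fun q =>
      if q.2.any (fun kw => subs.contains (PySem.Chars.lower kw.toList)) then [(p.1, q.1)]
      else []))

-- ===== PRECONDITION & SPEC =====
def Spec_find_clause_candidates (paragraph : String) (taxonomy : List (String × List (String × List String))) (out : List (String × String)) : Prop := out = find_clause_candidates_alt paragraph taxonomy
instance (paragraph : String) (taxonomy : List (String × List (String × List String))) (out : List (String × String)) : Decidable (Spec_find_clause_candidates paragraph taxonomy out) := by unfold Spec_find_clause_candidates; infer_instance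

-- ===== CLAIM (what is proved, stated in full; the proofs are below) =====
def Claim_equal_find_clause_candidates : Prop := ∀ (paragraph : String) (taxonomy : List (String × List (String × List String))), Dom_find_clause_candidates paragraph taxonomy → Spec_find_clause_candidates paragraph taxonomy (find_clause_candidates paragraph taxonomy)

-- ===== LEMMAS AND PROOFS =====

-- every element of the substring set occurs in the paragraph
lemma mem_bSubs_isIn (pl : List Char) (lengths : List Nat) (sub : List Char)
    (h : sub ∈ bSubs pl lengths) : PySem.Chars.isIn sub pl = true := by
  have hl := (PySem.Set.mem_ofList _ _).mp h
  rcases List.mem_flatMap.mp hl with ⟨L, _, hmap⟩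
  rcases List.mem_map.mp hmap with ⟨i, hi, hslice⟩
  rcases (PySem.List.mem_pyRange_one).mp hi with ⟨hi0, _⟩
  lift i to Nat using hi0 with j
  rw [PySem.List.slice_natCast_add] at hslice
  apply (PySem.Chars.exists_prefix_drop_iff_isIn sub pl).mp
  exact ⟨j, hslice ▸ List.take_prefix _ _⟩

-- and conversely: a string of a recorded length occurring in the paragraph is in the set
lemma isIn_mem_bSubs (pl : List Char) (lengths : List Nat) (sub : List Char)
    (hlen : sub.length ∈ lengths) (h : PySem.Chars.isIn sub pl = true) :
    sub ∈ bSubs pl lengths := by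
  rcases (PySem.Chars.exists_prefix_drop_iff_isIn sub pl).mpr h with ⟨j, hpre⟩
  have hle : sub.length ≤ pl.length - j := by
    simpa using hpre.length_le
  set i : Nat := min j pl.length with hidef
  have hpre' : sub <+: pl.drop i := by
    by_cases hj : j ≤ pl.length
    · simpa [hidef, min_eq_left hj] using hpre
    · have hsub : sub = [] := by
        have : pl.length - j = 0 := by omega
        exact List.eq_nil_of_length_eq_zero (by omega)
      simp [hsub]
  have hbound : i + sub.length ≤ pl.length := by
    by_cases hj : j ≤ pl.length
    · have : i = j := min_eq_left hj
      omega
    · have : pl.length - j = 0 := by omega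
      have : sub.length = 0 := by omega
      omega
  apply (PySem.Set.mem_ofList _ _).mpr
  apply List.mem_flatMap.mpr
  refine ⟨sub.length, hlen, List.mem_map.mpr ⟨(i : Int), ?_, ?_⟩⟩
  · apply (PySem.List.mem_pyRange_one).mpr
    constructor
    · exact_mod_cast Int.natCast_nonneg i
    · omega
  · rw [PySem.List.slice_natCast_add]
    exact ((List.prefix_iff_eq_take.mp hpre').symm)

-- lower is code-point-wise, hence length-preserving
lemma length_lower (cs : List Char) : (PySem.Chars.lower cs).length = cs.length := by
  simp [PySem.Chars.lower]

-- the O(1) set lookup agrees with A's fresh substring test, for any taxonomy keyword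
lemma bSubs_contains (paragraph : String) (taxonomy : List (String × List (String × List String)))
    (kw : String) (h : kw ∈ bAllKws taxonomy) :
    (bSubs (PySem.Chars.lower paragraph.toList)
        (PySem.Set.ofList ((bAllKws taxonomy).map (fun kw => kw.toList.length)))).contains
      (PySem.Chars.lower kw.toList)
      = PySem.Str.isIn (PySem.Str.lower kw) (PySem.Str.lower paragraph) := by
  have hstr : PySem.Str.isIn (PySem.Str.lower kw) (PySem.Str.lower paragraph)
      = PySem.Chars.isIn (PySem.Chars.lower kw.toList) (PySem.Chars.lower paragraph.toList) := by
    simp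
  rw [hstr]
  apply Bool.coe_iff_coe.mp
  constructor
  · intro hc
    exact mem_bSubs_isIn _ _ _ (List.mem_of_elem_eq_true hc)
  · intro hin
    apply List.elem_eq_true_of_mem
    apply isIn_mem_bSubs
    · rw [length_lower]
      exact (PySem.Set.mem_ofList _ _).mpr (List.mem_map.mpr ⟨kw, h, rfl⟩)
    · exact hin

-- A's break-loop appends exactly one pair iff some keyword matches.
lemma aKwLoop_eq (pl at_ ct : String) (acc : List (String × String)) (kws : List String) :
    aKwLoop pl at_ ct acc kws =
      acc ++ (if kws.any (fun kw => PySem.Str.isIn (PySem.Str.lower kw) pl)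
              then [(at_, ct)] else []) := by
  induction kws with
  | nil => simp [aKwLoop]
  | cons kw rest ih =>
    by_cases hkw : PySem.Str.isIn (PySem.Str.lower kw) pl = true
    · simp at hkw
      simp [aKwLoop, hkw]
    · simp at hkw
      simp [aKwLoop, hkw, ih]

-- inner clauses fold = inner flatMap, for any lookup predicate agreeing on present keywords
lemma inner_eq (pl : String) (pr : String → Bool) (at_ : String)
    (clauses : List (String × List String))
    (H : ∀ kw ∈ clauses.flatMap (fun q => q.2),
      pr kw = PySem.Str.isIn (PySem.Str.lower kw) pl) :
    ∀ acc, clauses.foldl (fun acc q => aKwLoop pl at_ q.1 acc q.2) acc =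
      acc ++ clauses.flatMap (fun q =>
        if q.2.any pr then [(at_, q.1)] else []) := by
  induction clauses with
  | nil => intro acc; simp
  | cons q rest ih =>
    intro acc
    have hq : q.2.any pr = q.2.any (fun kw => PySem.Str.isIn (PySem.Str.lower kw) pl) := by
      apply Bool.coe_iff_coe.mp
      simp only [List.any_eq_true]
      constructor
      · rintro ⟨x, hx, hp⟩
        refine ⟨x, hx, ?_⟩
        rw [← H x (by rw [List.flatMap_cons]; exact List.mem_append_left _ hx)]
        exact hp
      · rintro ⟨x, hx, hp⟩
        refine ⟨x, hx, ?_⟩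
        rw [H x (by rw [List.flatMap_cons]; exact List.mem_append_left _ hx)]
        exact hp
    simp only [List.foldl_cons, List.flatMap_cons]
    rw [ih (fun kw hkw => H kw
          (by rw [List.flatMap_cons]; exact List.mem_append_right _ hkw)),
        aKwLoop_eq, hq]
    simp

-- bAllKws unrolled one step (definitional)
lemma bAllKws_cons (p : String × List (String × List String))
    (rest : List (String × List (String × List String))) :
    bAllKws (p :: rest) = p.2.flatMap (fun q => q.2) ++ bAllKws rest := rfl

-- outer taxonomy fold = outer flatMap
lemma outer_eq (pl : String) (pr : String → Bool)
    (t : List (String × List (String × List String)))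
    (H : ∀ kw ∈ bAllKws t,
      pr kw = PySem.Str.isIn (PySem.Str.lower kw) pl) :
    ∀ acc, t.foldl (fun acc p => p.2.foldl (fun acc q => aKwLoop pl p.1 q.1 acc q.2) acc) acc =
      acc ++ t.flatMap (fun p => p.2.flatMap (fun q =>
        if q.2.any pr then [(p.1, q.1)] else [])) := by
  induction t with
  | nil => intro acc; simp
  | cons p rest ih =>
    intro acc
    simp only [List.foldl_cons, List.flatMap_cons]
    rw [inner_eq pl pr p.1 p.2
        (fun kw hkw => H kw (by rw [bAllKws_cons]; exact List.mem_append_left _ hkw)),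
        ih (fun kw hkw => H kw (by rw [bAllKws_cons]; exact List.mem_append_right _ hkw))]
    simp

-- ===== VERDICT (by name: the statement is the Claim_ definition above) =====
theorem find_clause_candidates_spec : Claim_equal_find_clause_candidates := by
  intro paragraph taxonomy _
  unfold Spec_find_clause_candidates find_clause_candidates find_clause_candidates_alt
  exact outer_eq (PySem.Str.lower paragraph) _ taxonomy
    (fun kw hkw => bSubs_contains paragraph taxonomy kw hkw) []
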